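-- pv_equiv track=rewrite | github.com/Netcracker/qubership-envgene | github_workflows/instance-repo-pipeline/extend_logic/scripts/apply_envgene_patch.py | _find_block_by_path
-- ===== SOURCE A (Python) =====
-- def _find_block_by_path(lines, path_str):
--     """Find (line_index, content_indent) of block at path like jobs.process_environment_variables.outputs."""
--     parts = path_str.split(".")
--     search_start = 0
--     block_line = None
--     content_indent = 2
--     prev_indent = -1
--
--     for part in parts:
--         found = None
--         for i in range(search_start, len(lines)):
--             line = lines[i]
--             stripped = line.strip()
--             if not stripped or stripped.startswith("#"):
--                 continue
--             line_indent = len(line) - len(line.lstrip())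
--             if ":" in stripped and not stripped.startswith("-"):
--                 key = stripped.split(":")[0].strip()
--                 if key == part and line_indent > prev_indent:
--                     found = (i, line_indent)
--                     search_start = i + 1
--                     break
--         if found is None:
--             return None, 2
--         block_line, prev_indent = found
--         content_indent = prev_indent + 2
--
--     return block_line, content_indent
-- ===== SOURCE B (Python) =====
-- def _find_block_by_path(lines, path_str):
--     """Find (line_index, content_indent) of block at path like jobs.process_environment_variables.outputs."""
--     # Single forward pass over the lines, consuming path parts as they match.
--     parts = path_str.split(".")
--     k = 0                       # index of the next part to match
--     prev_indent = -1
--     block_line = None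
--     for i, line in enumerate(lines):
--         if k == len(parts):
--             break
--         s = line.strip()
--         if not s or s.startswith("#") or ":" not in s or s.startswith("-"):
--             continue
--         indent = len(line) - len(line.lstrip())
--         if s.split(":")[0].strip() == parts[k] and indent > prev_indent:
--             block_line, prev_indent = i, indent
--             k += 1
--     if k < len(parts):
--         return None, 2
--     return block_line, prev_indent + 2
-- ===== Notes on version B (the rewrite author's own statement) =====
-- stated objective: alternative
-- what changed: Inverts the loop nesting: instead of A's outer loop over path parts each rescanning the lines from search_start, B makes a single forward pass over the lines, consuming the next path part whenever a candidate line matches it with a larger indent (correct because A's search_start is monotone).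
import Mathlib
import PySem

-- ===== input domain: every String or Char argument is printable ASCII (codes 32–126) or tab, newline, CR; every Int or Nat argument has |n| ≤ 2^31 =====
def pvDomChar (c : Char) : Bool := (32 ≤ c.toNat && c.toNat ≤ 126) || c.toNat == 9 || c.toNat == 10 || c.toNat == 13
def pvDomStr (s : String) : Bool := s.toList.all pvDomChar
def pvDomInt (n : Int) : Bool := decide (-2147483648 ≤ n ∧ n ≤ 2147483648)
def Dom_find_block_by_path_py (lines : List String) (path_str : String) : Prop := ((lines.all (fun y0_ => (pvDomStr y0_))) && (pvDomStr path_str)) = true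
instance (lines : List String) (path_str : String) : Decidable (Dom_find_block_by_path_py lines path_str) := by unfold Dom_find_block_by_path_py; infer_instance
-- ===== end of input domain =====

-- B inverts A's loop nesting: one forward pass over the lines consuming path parts as they
-- match, instead of an outer loop over parts each rescanning the lines (objective: alternative).

-- ===== PORT A =====
-- inner 'for i in range(search_start, len(lines)): … break' loop of A
def pvFindA (lines : List String) (part : String) (prev : Int) (i : Nat) : Option (Nat × Int) :=
  if h : i < lines.length then
    let line := lines[i]
    let stripped := PySem.Str.strip line
    if stripped = "" || PySem.Str.startswith stripped "#" then
      pvFindA lines part prev (i + 1)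
    else
      let lineIndent : Int := PySem.Str.len line - PySem.Str.len (PySem.Str.lstrip line)
      if PySem.Str.isIn ":" stripped && !PySem.Str.startswith stripped "-" then
        let key := PySem.Str.strip (((PySem.Str.split? stripped ":").getD []).headD "")
        if key = part ∧ prev < lineIndent then some (i, lineIndent)
        else pvFindA lines part prev (i + 1)
      else pvFindA lines part prev (i + 1)
  else none
termination_by lines.length - i

-- outer 'for part in parts' loop of A; state = (search_start, block_line, content_indent, prev_indent)
def pvLoopA (lines : List String) : List String → Nat → Option Int → Int → Int → Option Int × Int
  | [], _, block, cind, _ => (block, cind)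
  | part :: rest, ss, _, _, prev =>
      match pvFindA lines part prev ss with
      | none => (none, 2)
      | some (i, ind) => pvLoopA lines rest (i + 1) (some (i : Int)) (ind + 2) ind

def find_block_by_path_py (lines : List String) (path_str : String) : Option Int × Int :=
  pvLoopA lines ((PySem.Str.split? path_str ".").getD []) 0 none 2 (-1)

-- ===== PORT B =====
-- B's single 'for i, line in enumerate(lines)' pass; the remaining-parts list plays the
-- role of Source B's pointer k into parts (parts.drop k); 'break'/end-of-loop = the [] parts case.
def pvScanB : List String → Nat → List String → Option Int → Int → Option Int × Int
  | _, _, [], block, prev => (block, prev + 2)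
  | [], _, _ :: _, _, _ => (none, 2)
  | l :: t, i, part :: rest, block, prev =>
      let s := PySem.Str.strip l
      if s = "" || PySem.Str.startswith s "#" || !PySem.Str.isIn ":" s || PySem.Str.startswith s "-" then
        pvScanB t (i + 1) (part :: rest) block prev
      else
        let ind : Int := PySem.Str.len l - PySem.Str.len (PySem.Str.lstrip l)
        if PySem.Str.strip (((PySem.Str.split? s ":").getD []).headD "") = part ∧ prev < ind then
          pvScanB t (i + 1) rest (some (i : Int)) ind
        else
          pvScanB t (i + 1) (part :: rest) block prev

def find_block_by_path_py_alt (lines : List String) (path_str : String) : Option Int × Int :=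
  pvScanB lines 0 ((PySem.Str.split? path_str ".").getD []) none (-1)

-- ===== PRECONDITION & SPEC =====
def Spec_find_block_by_path_py (lines : List String) (path_str : String) (out : Option Int × Int) : Prop := out = find_block_by_path_py_alt lines path_str
instance (lines : List String) (path_str : String) (out : Option Int × Int) : Decidable (Spec_find_block_by_path_py lines path_str out) := by unfold Spec_find_block_by_path_py; infer_instance

-- ===== CLAIM (what is proved, stated in full; the proofs are below) =====
def Claim_equal_find_block_by_path_py : Prop := ∀ (lines : List String) (path_str : String), Dom_find_block_by_path_py lines path_str → Spec_find_block_by_path_py lines path_str (find_block_by_path_py lines path_str)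

-- ===== LEMMAS AND PROOFS =====

-- B's pass over the suffix from i, on a nonempty parts list, first computes A's inner
-- scan for the head part and then continues from just past the match.
theorem scanB_step (lines : List String) :
    ∀ (susp : List String) (i : Nat), lines.drop i = susp →
    ∀ (part : String) (rest : List String) (block : Option Int) (prev : Int),
      pvScanB susp i (part :: rest) block prev =
        match pvFindA lines part prev i with
        | none => (none, 2)
        | some (j, ind) => pvScanB (lines.drop (j + 1)) (j + 1) rest (some (j : Int)) ind := by
  intro susp
  induction susp with
  | nil =>
      intro i hd part rest block prev
      have hlen : lines.length ≤ i := by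
        have := congrArg List.length hd; simp at this; omega
      rw [pvFindA]
      simp [pvScanB, Nat.not_lt_of_ge hlen]
  | cons l t ih =>
      intro i hd part rest block prev
      have hi : i < lines.length := by
        by_contra h
        rw [List.drop_eq_nil_of_le (Nat.le_of_not_lt h)] at hd
        exact (List.cons_ne_nil l t) hd.symm
      have hcons : lines[i] :: lines.drop (i + 1) = lines.drop i :=
        List.getElem_cons_drop hi
      rw [hd] at hcons
      have hl : lines[i] = l := (List.cons.injEq _ _ _ _ ▸ hcons).1
      have ht : lines.drop (i + 1) = t := (List.cons.injEq _ _ _ _ ▸ hcons).2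
      rw [pvFindA]
      simp only [hi, dif_pos, hl]
      rw [pvScanB]
      by_cases h1 : PySem.Str.strip l = ""
      · simp [h1, ih (i + 1) ht part rest block prev]
      · by_cases h2 : PySem.Chars.startswith (PySem.Chars.strip l.toList) ['#'] = true
        · simp [h1, h2, ih (i + 1) ht part rest block prev]
        · by_cases h3 : PySem.Chars.isIn [':'] (PySem.Chars.strip l.toList) = true
          · by_cases h4 : PySem.Chars.startswith (PySem.Chars.strip l.toList) ['-'] = true
            · simp [h1, h2, h3, h4, ih (i + 1) ht part rest block prev]
            · by_cases h5 : PySem.Str.strip (((PySem.Str.split? (PySem.Str.strip l) ":").getD []).head?.getD "") = part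
                ∧ prev < (l.length : Int) - ((PySem.Chars.lstrip l.toList).length : Int)
              · simp [h1, h2, h3, h4, h5, ht]
              · simp [h1, h2, h3, h4, h5, ih (i + 1) ht part rest block prev]
          · simp [h1, h2, h3, ih (i + 1) ht part rest block prev]

-- the two loop structures agree, given cind = prev + 2 or at least one part remaining
theorem scanB_eq_loopA (lines : List String) :
    ∀ (parts : List String) (ss : Nat) (block : Option Int) (cind prev : Int),
      (cind = prev + 2 ∨ parts ≠ []) →
      pvLoopA lines parts ss block cind prev = pvScanB (lines.drop ss) ss parts block prev := by
  intro parts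
  induction parts with
  | nil =>
      intro ss block cind prev h
      rcases h with h | h
      · cases hd : lines.drop ss with
        | nil => simp [pvLoopA, pvScanB, h]
        | cons a b => simp [pvLoopA, pvScanB, h]
      · exact absurd rfl h
  | cons part rest ih =>
      intro ss block cind prev _
      rw [pvLoopA, scanB_step lines (lines.drop ss) ss rfl part rest block prev]
      cases hf : pvFindA lines part prev ss with
      | none => simp
      | some p =>
          simp only []
          exact ih (p.1 + 1) (some (p.1 : Int)) (p.2 + 2) p.2 (Or.inl rfl)

-- Python's split on a non-empty separator never returns an empty list
theorem splitOn_go_ne_nil (sep : List Char) :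
    ∀ (fuel : Nat) (l cur : List Char) (acc : List (List Char)),
      PySem.Chars.splitOn.go sep fuel l cur acc ≠ [] := by
  intro fuel
  induction fuel with
  | zero => intro l cur acc; rw [PySem.Chars.splitOn.go.eq_def]; simp
  | succ n ih =>
      intro l cur acc
      rw [PySem.Chars.splitOn.go.eq_def]
      cases l with
      | nil => simp
      | cons c rest =>
          by_cases h : sep.isPrefixOf (c :: rest) = true
          · simp only [h, if_pos]; exact ih _ _ _
          · simp only [h, if_neg, Bool.false_eq_true, not_false_iff]; exact ih _ _ _

theorem split_dot_ne_nil (path_str : String) :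
    (PySem.Str.split? path_str ".").getD [] ≠ [] := by
  unfold PySem.Str.split? PySem.Chars.split? PySem.Chars.splitOn
  intro h
  simp only [show ((".".toList : List Char)).isEmpty = false from rfl, Bool.false_eq_true,
    if_false, Option.map_some, Option.getD_some, List.map_eq_nil_iff] at h
  exact splitOn_go_ne_nil _ _ _ _ _ h

-- ===== VERDICT (by name: the statement is the Claim_ definition above) =====
theorem find_block_by_path_py_spec : Claim_equal_find_block_by_path_py := by
  intro lines path_str _
  unfold Spec_find_block_by_path_py find_block_by_path_py find_block_by_path_py_alt
  rw [scanB_eq_loopA lines ((PySem.Str.split? path_str ".").getD []) 0 none 2 (-1)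
    (Or.inr (split_dot_ne_nil path_str))]
  simp
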